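-- pv_equiv track=rewrite | github.com/DavidTriphon/OpusMagnumSolver | step.py | step_order_generator
-- ===== SOURCE A (Python) =====
-- def step_preconditions(step):
--     if step[0] == "c":
--         return []
--     if step[0] == "b":
--         return []
--
-- def available(chosen, steps):
--     return [
--         s for s in steps
--         if s not in chosen and all(x in chosen for x in step_preconditions(s))
--     ]
--
-- def step_order_generator(steps, prefix=None):
--     if prefix is None:
--         prefix = []
--     if len(prefix) == len(steps):
--         yield prefix
--     for a in available(prefix, steps):
--         for p in step_order_generator(steps, prefix + [a]):
--             yield p
-- ===== SOURCE B (Python) =====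
-- def step_order_generator(steps, prefix=None):
--     # Carries the shrinking "remaining" pool down the recursion instead of
--     # rescanning the whole steps list (and its preconditions) at every node.
--     if prefix is None:
--         prefix = []
--
--     def perms(pre, rem):
--         out = [pre] if len(pre) == len(steps) else []
--         for a in rem:
--             out += perms(pre + [a], [t for t in rem if t != a])
--         return out
--
--     return perms(prefix, [s for s in steps if s not in prefix])
-- ===== Notes on version B (the rewrite author's own statement) =====
-- stated objective: alternative
-- what changed: B maintains a shrinking 'remaining' pool passed down the recursion (dropping the chosen element by filtering), instead of A's rescan of the full steps list with membership tests and a precondition check at every node.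
import Mathlib
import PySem

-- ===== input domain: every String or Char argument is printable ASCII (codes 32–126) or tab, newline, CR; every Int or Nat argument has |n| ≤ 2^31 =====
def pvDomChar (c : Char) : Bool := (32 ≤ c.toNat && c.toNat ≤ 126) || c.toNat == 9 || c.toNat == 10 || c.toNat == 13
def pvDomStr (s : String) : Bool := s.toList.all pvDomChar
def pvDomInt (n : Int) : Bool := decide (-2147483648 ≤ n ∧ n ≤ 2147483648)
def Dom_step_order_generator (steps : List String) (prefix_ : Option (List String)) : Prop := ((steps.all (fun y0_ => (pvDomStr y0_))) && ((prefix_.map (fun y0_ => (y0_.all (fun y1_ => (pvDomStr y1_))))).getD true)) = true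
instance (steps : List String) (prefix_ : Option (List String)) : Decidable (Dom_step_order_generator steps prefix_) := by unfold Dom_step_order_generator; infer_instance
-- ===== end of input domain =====

-- B passes a shrinking "remaining" pool down the recursion instead of A's per-node rescan of
-- steps with membership tests and step_preconditions; equivalence of the returned values is
-- proved on Pre_ (A is a generator; outputs are compared as the list of yielded orderings).

-- ===== PORT A =====
-- step_preconditions: 'some []' for steps starting with 'c'/'b'; 'none' marks where the
-- Python computation raises later (IndexError on step[0] for "", or the returned None
-- causing a TypeError inside available).  Unreachable under Pre_.
def pvStepPreconditions (step : String) : Option (List String) :=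
  match PySem.Str.pyGet? step 0 with
  | none => none
  | some c => if c = 'c' then some [] else if c = 'b' then some [] else none

-- the per-element condition of available's comprehension (Python short-circuits 'and')
def pvAvailCheck (chosen : List String) (s : String) : Option Bool :=
  if s ∈ chosen then some false
  else
    match pvStepPreconditions s with
    | none => none  -- Python raises here (unreachable under Pre_)
    | some pre => some (pre.all (fun x => decide (x ∈ chosen)))

def pvAvailable (chosen steps : List String) : Option (List String) :=
  match steps with
  | [] => some []
  | s :: rest =>
    match pvAvailCheck chosen s with
    | none => none
    | some b =>
      match pvAvailable chosen rest with
      | none => none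
      | some t => some (if b then s :: t else t)

-- recursive body of A (steps fixed, prefix grows exactly as Python passes prefix + [a]);
-- the fuel argument only makes the recursion structural: it strictly exceeds the number of
-- not-yet-chosen steps, which bounds the recursion depth, so the 0 branch is unreachable.
def pvSogA (fuel : Nat) (steps prefix_ : List String) : List (List String) :=
  match fuel with
  | 0 => []
  | n + 1 =>
    (if prefix_.length = steps.length then [prefix_] else []) ++
    (match pvAvailable prefix_ steps with
     | none => []  -- Python raises while building available (unreachable under Pre_)
     | some avail => avail.flatMap (fun a => pvSogA n steps (prefix_ ++ [a])))

def step_order_generator (steps : List String) (prefix_ : Option (List String)) : List (List String) :=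
  let p := match prefix_ with | none => [] | some p => p
  pvSogA ((steps.filter (fun s => decide (s ∉ p))).length + 1) steps p

-- ===== PORT B =====
-- perms from Source B; same fuel device (recursion depth = rem.length, so fuel suffices).
def pvPermsB (fuel : Nat) (steps pre rem : List String) : List (List String) :=
  match fuel with
  | 0 => []
  | n + 1 =>
    (if pre.length = steps.length then [pre] else []) ++
    rem.flatMap (fun a => pvPermsB n steps (pre ++ [a]) (rem.filter (fun t => decide (t ≠ a))))

def step_order_generator_alt (steps : List String) (prefix_ : Option (List String)) : List (List String) :=
  let pre := match prefix_ with | none => [] | some p => p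
  let rem := steps.filter (fun s => decide (s ∉ pre))
  pvPermsB (rem.length + 1) steps pre rem

-- ===== PRECONDITION & SPEC =====
-- Pre_ excludes exactly the inputs on which Python A raises when consumed: some step
-- outside the starting prefix is empty (IndexError) or starts with a character other
-- than 'c'/'b' (step_preconditions returns None → TypeError in available).
def Pre_step_order_generator (steps : List String) (prefix_ : Option (List String)) : Prop :=
  ∀ s ∈ steps, s ∉ (match prefix_ with | none => [] | some p => p) →
    (s.toList.head? = some 'c' ∨ s.toList.head? = some 'b')
instance (steps : List String) (prefix_ : Option (List String)) : Decidable (Pre_step_order_generator steps prefix_) := by unfold Pre_step_order_generator; infer_instance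

def pvWitness_step_order_generator : List String × Option (List String) := (["c1", "b2"], none)

def Spec_step_order_generator (steps : List String) (prefix_ : Option (List String)) (out : List (List String)) : Prop := out = step_order_generator_alt steps prefix_
instance (steps : List String) (prefix_ : Option (List String)) (out : List (List String)) : Decidable (Spec_step_order_generator steps prefix_ out) := by unfold Spec_step_order_generator; infer_instance

-- ===== CLAIM (what is proved, stated in full; the proofs are below) =====
def Claim_equal_step_order_generator : Prop := ∀ (steps : List String) (prefix_ : Option (List String)), Dom_step_order_generator steps prefix_ → Pre_step_order_generator steps prefix_ → Spec_step_order_generator steps prefix_ (step_order_generator steps prefix_)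

-- ===== LEMMAS AND PROOFS =====

def pvGood (s : String) : Prop := s.toList.head? = some 'c' ∨ s.toList.head? = some 'b'

theorem pvFilterNeLt {α : Type} [DecidableEq α] (a : α) (l : List α) (h : a ∈ l) :
    (l.filter (fun t => decide (t ≠ a))).length < l.length := by
  induction l with
  | nil => cases h
  | cons x xs ih =>
    by_cases hx : x = a
    · subst hx
      have he : (x :: xs).filter (fun t => decide (t ≠ x)) = xs.filter (fun t => decide (t ≠ x)) := by
        simp
      rw [he]
      exact Nat.lt_succ_of_le (List.length_filter_le _ _)
    · have hm : a ∈ xs := by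
        cases h with
        | head => exact absurd rfl hx
        | tail _ h => exact h
      have he : (x :: xs).filter (fun t => decide (t ≠ a)) = x :: xs.filter (fun t => decide (t ≠ a)) := by
        simp [hx]
      rw [he, List.length_cons, List.length_cons]
      exact Nat.succ_lt_succ (ih hm)

theorem pvFilterAppendSingleton (steps prefix_ : List String) (a : String) :
    steps.filter (fun s => decide (s ∉ prefix_ ++ [a]))
      = (steps.filter (fun s => decide (s ∉ prefix_))).filter (fun t => decide (t ≠ a)) := by
  rw [List.filter_filter]
  apply List.filter_congr
  intro s _
  simp [List.mem_append, not_or, and_comm]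

theorem pvStepPre_good {s : String} (h : pvGood s) : pvStepPreconditions s = some [] := by
  have h0 : PySem.Str.pyGet? s 0 = s.toList[0]? := by
    simpa using PySem.Str.pyGet?_natCast s (0 : Nat)
  have h1 : s.toList[0]? = s.toList.head? := List.head?_eq_getElem?.symm
  unfold pvStepPreconditions
  rw [h0, h1]
  cases h with
  | inl h => simp [h]
  | inr h => simp [h]

-- under Pre_, available is exactly the membership filter
theorem pvAvailable_eq (chosen steps : List String)
    (hg : ∀ s ∈ steps, s ∉ chosen → pvGood s) :
    pvAvailable chosen steps = some (steps.filter (fun s => decide (s ∉ chosen))) := by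
  induction steps with
  | nil => simp [pvAvailable]
  | cons s rest ih =>
    have ihr := ih (fun t ht h => hg t (List.mem_cons_of_mem _ ht) h)
    simp only [pvAvailable, ihr]
    by_cases hm : s ∈ chosen
    · simp [pvAvailCheck, hm]
    · have hgood := hg s List.mem_cons_self hm
      simp [pvAvailCheck, hm, pvStepPre_good hgood]

theorem pvFlatMapCongr {α β : Type} {l : List α} {f g : α → List β}
    (h : ∀ a ∈ l, f a = g a) : l.flatMap f = l.flatMap g := by
  induction l with
  | nil => rfl
  | cons x xs ih =>
    simp only [List.flatMap_cons]
    rw [h x List.mem_cons_self, ih (fun a ha => h a (List.mem_cons_of_mem _ ha))]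

theorem pvMain (fuel : Nat) (steps prefix_ : List String)
    (hfuel : (steps.filter (fun s => decide (s ∉ prefix_))).length < fuel)
    (hg : ∀ s ∈ steps, s ∉ prefix_ → pvGood s) :
    pvSogA fuel steps prefix_
      = pvPermsB fuel steps prefix_ (steps.filter (fun s => decide (s ∉ prefix_))) := by
  induction fuel generalizing prefix_ with
  | zero => cases hfuel
  | succ n ih =>
    simp only [pvSogA, pvPermsB, pvAvailable_eq _ _ hg]
    congr 1
    apply pvFlatMapCongr
    intro a ha
    have hmem := List.mem_filter.mp ha
    have hout : a ∉ prefix_ := by simpa using hmem.2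
    rw [← pvFilterAppendSingleton]
    apply ih
    · have := pvFilterNeLt a _ ha
      rw [pvFilterAppendSingleton]
      omega
    · intro s hs h
      exact hg s hs (fun hc => h (List.mem_append.mpr (Or.inl hc)))

-- ===== VERDICT (by name: the statement is the Claim_ definition above) =====
theorem step_order_generator_spec : Claim_equal_step_order_generator := by
  intro steps prefix_ _ hpre
  unfold Spec_step_order_generator step_order_generator step_order_generator_alt
  exact pvMain _ steps _ (Nat.lt_succ_self _) hpre
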